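-- pv_equiv track=rewrite | github.com/rikard-helgegren/leverage_analysis_tool | src/model/common/fill_in_missing_dates.py | find_first_common_market_day
-- ===== SOURCE A (Python) =====
-- def find_first_common_market_day(lists_of_indexes, chosen_time_interval_start_date):
--     """ Returns the earliest day that all selected indexes have in common
--         or
--         The manually set day to use as first, if it is valid for all indexes.
--     """
--     first_common = max([index_days[0] for index_days in lists_of_indexes])
--     if chosen_time_interval_start_date == 0:
--         return first_common
--
--     if  chosen_time_interval_start_date > first_common:
--         for i in range(10_000): #High enough to change year
--             for index in lists_of_indexes:
--                 if (chosen_time_interval_start_date + i) in index: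
--                     return chosen_time_interval_start_date + i
--     else:
--         return first_common
-- ===== SOURCE B (Python) =====
-- def find_first_common_market_day(lists_of_indexes, chosen_time_interval_start_date):
--     """ Returns the earliest day that all selected indexes have in common
--         or
--         The manually set day to use as first, if it is valid for all indexes.
--     """
--     first_common = max(index_days[0] for index_days in lists_of_indexes)
--     chosen = chosen_time_interval_start_date
--     if chosen == 0 or chosen <= first_common:
--         return first_common
--     candidates = [d for index in lists_of_indexes for d in index
--                   if chosen <= d < chosen + 10000]
--     return min(candidates) if candidates else None
-- ===== Notes on version B (the rewrite author's own statement) =====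
-- stated objective: faster
-- what changed: Instead of iterating over 10000 candidate days and testing membership of each in every list, B collects in one pass all days d with chosen <= d < chosen+10000 from the data and returns their minimum (None if there are none).
import Mathlib
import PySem

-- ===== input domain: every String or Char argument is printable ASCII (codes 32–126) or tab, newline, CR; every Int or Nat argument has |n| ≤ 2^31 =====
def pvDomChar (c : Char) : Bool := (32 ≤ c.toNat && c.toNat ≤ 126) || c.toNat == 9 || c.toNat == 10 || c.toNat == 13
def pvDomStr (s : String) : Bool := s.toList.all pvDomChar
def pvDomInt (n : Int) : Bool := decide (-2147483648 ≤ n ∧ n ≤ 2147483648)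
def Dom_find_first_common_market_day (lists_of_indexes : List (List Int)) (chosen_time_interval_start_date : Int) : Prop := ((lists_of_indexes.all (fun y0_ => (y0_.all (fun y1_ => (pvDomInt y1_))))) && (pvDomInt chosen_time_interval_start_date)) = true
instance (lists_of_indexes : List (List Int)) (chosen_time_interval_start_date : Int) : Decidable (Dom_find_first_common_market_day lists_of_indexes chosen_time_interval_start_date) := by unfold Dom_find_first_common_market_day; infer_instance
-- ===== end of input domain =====

-- ===== PORT A =====
-- B replaces the 10000-candidate membership scan after `chosen` by one pass over the data + min
-- (measured faster in a timing run).

-- inner loop: 'for index in lists_of_indexes: if (chosen+i) in index: return chosen+i'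
def pvAInner : List (List Int) → Int → Option Int
  | [], _ => none
  | idx :: rest, d => if idx.contains d then some d else pvAInner rest d

-- outer loop: 'for i in range(10_000): …' (falls through to None)
def pvALoop (lists_of_indexes : List (List Int)) (c : Int) : List Int → Option Int
  | [] => none
  | i :: rest =>
    match pvAInner lists_of_indexes (c + i) with
    | some v => some v
    | none => pvALoop lists_of_indexes c rest

def find_first_common_market_day (lists_of_indexes : List (List Int)) (chosen_time_interval_start_date : Int) : Option Int :=
  match PySem.List.max? (lists_of_indexes.map fun l => l.headD 0) (fun x => x) with
  | none => none  -- unreachable under Pre_ (Python raises ValueError on max([]))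
  | some first_common =>
    if chosen_time_interval_start_date = 0 then some first_common
    else if chosen_time_interval_start_date > first_common then
      pvALoop lists_of_indexes chosen_time_interval_start_date (PySem.List.pyRange 0 10000 1)
    else some first_common

-- ===== PORT B =====
def find_first_common_market_day_alt (lists_of_indexes : List (List Int)) (chosen_time_interval_start_date : Int) : Option Int :=
  match PySem.List.max? (lists_of_indexes.map fun l => l.headD 0) (fun x => x) with
  | none => none  -- unreachable under Pre_ (Python raises ValueError on max of empty generator)
  | some first_common =>
    let chosen := chosen_time_interval_start_date
    if chosen = 0 ∨ chosen ≤ first_common then some first_common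
    else
      let candidates := lists_of_indexes.flatMap fun idx =>
        idx.filter fun d => decide (chosen ≤ d) && decide (d < chosen + 10000)
      PySem.List.min? candidates (fun x => x)

-- ===== PRECONDITION & SPEC =====
-- Pre_ excludes exactly the inputs where the Python A raises: an empty list of lists
-- (ValueError from max([])) or any empty member list (IndexError from index_days[0]).
def Pre_find_first_common_market_day (lists_of_indexes : List (List Int)) (chosen_time_interval_start_date : Int) : Prop :=
  lists_of_indexes ≠ [] ∧ ∀ l ∈ lists_of_indexes, l ≠ []
instance (lists_of_indexes : List (List Int)) (chosen_time_interval_start_date : Int) : Decidable (Pre_find_first_common_market_day lists_of_indexes chosen_time_interval_start_date) := by unfold Pre_find_first_common_market_day; infer_instance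

def pvWitness_find_first_common_market_day : List (List Int) × Int := ([[1, 3, 5], [2, 3]], 2)

def Spec_find_first_common_market_day (lists_of_indexes : List (List Int)) (chosen_time_interval_start_date : Int) (out : Option Int) : Prop := out = find_first_common_market_day_alt lists_of_indexes chosen_time_interval_start_date
instance (lists_of_indexes : List (List Int)) (chosen_time_interval_start_date : Int) (out : Option Int) : Decidable (Spec_find_first_common_market_day lists_of_indexes chosen_time_interval_start_date out) := by unfold Spec_find_first_common_market_day; infer_instance

-- ===== CLAIM (what is proved, stated in full; the proofs are below) =====
def Claim_equal_find_first_common_market_day : Prop := ∀ (lists_of_indexes : List (List Int)) (chosen_time_interval_start_date : Int), Dom_find_first_common_market_day lists_of_indexes chosen_time_interval_start_date → Pre_find_first_common_market_day lists_of_indexes chosen_time_interval_start_date → Spec_find_first_common_market_day lists_of_indexes chosen_time_interval_start_date (find_first_common_market_day lists_of_indexes chosen_time_interval_start_date)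

-- ===== LEMMAS AND PROOFS =====

-- the inner loop returns d exactly when some list contains d
theorem pvAInner_eq (ls : List (List Int)) (d : Int) :
    pvAInner ls d = if ∃ l ∈ ls, d ∈ l then some d else none := by
  induction ls with
  | nil => simp [pvAInner]
  | cons idx rest ih =>
    simp only [pvAInner, ih]
    by_cases h : d ∈ idx <;> by_cases h2 : ∃ l ∈ rest, d ∈ l <;>
      simp [h, h2]

-- the outer loop is find? over the candidate offsets, shifted by c
theorem pvALoop_eq_find? (ls : List (List Int)) (c : Int) (is : List Int) :
    pvALoop ls c is =
      (is.find? fun i => decide (∃ l ∈ ls, c + i ∈ l)).map (fun i => c + i) := by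
  induction is with
  | nil => simp [pvALoop]
  | cons i rest ih =>
    simp only [pvALoop, pvAInner_eq, List.find?_cons]
    by_cases h : ∃ l ∈ ls, c + i ∈ l <;> simp [h, ih]

-- membership in B's candidate list
theorem mem_candidates (ls : List (List Int)) (c d : Int) :
    d ∈ (ls.flatMap fun idx =>
        idx.filter fun x => decide (c ≤ x) && decide (x < c + 10000)) ↔
      (∃ l ∈ ls, d ∈ l) ∧ c ≤ d ∧ d < c + 10000 := by
  simp [List.mem_flatMap, List.mem_filter]
  constructor
  · rintro ⟨l, hl, hd, h1, h2⟩; exact ⟨⟨l, hl, hd⟩, h1, h2⟩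
  · rintro ⟨⟨l, hl, hd⟩, h1, h2⟩; exact ⟨l, hl, hd, h1, h2⟩

-- find? on a strictly increasing list returns the least element satisfying the predicate
theorem find?_min_of_pairwise {p : Int → Bool} {is : List Int} {i0 : Int}
    (hs : is.Pairwise (· < ·)) (h : is.find? p = some i0) :
    ∀ j ∈ is, p j → i0 ≤ j := by
  induction is with
  | nil => simp at h
  | cons a rest ih =>
    rw [List.find?_cons] at h
    rcases List.pairwise_cons.mp hs with ⟨ha, hrest⟩
    by_cases hpa : p a
    · simp [hpa] at h
      subst h
      intro j hj _
      rcases List.mem_cons.mp hj with rfl | hj'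
      · exact le_refl _
      · exact le_of_lt (ha j hj')
    · simp [hpa] at h
      intro j hj hpj
      rcases List.mem_cons.mp hj with rfl | hj'
      · exact absurd hpj (by simp [hpa])
      · exact ih hrest h j hj' hpj

-- the core equality: A's bounded linear search = min of B's one-pass candidate list
theorem core_eq (ls : List (List Int)) (c : Int) :
    pvALoop ls c (PySem.List.pyRange 0 10000 1) =
      PySem.List.min?
        (ls.flatMap fun idx =>
          idx.filter fun x => decide (c ≤ x) && decide (x < c + 10000)) (fun x => x) := by
  rw [pvALoop_eq_find?]
  set cands := ls.flatMap fun idx =>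
    idx.filter fun x => decide (c ≤ x) && decide (x < c + 10000) with hcands
  set p : Int → Bool := fun i => decide (∃ l ∈ ls, c + i ∈ l) with hp
  cases hfind : (PySem.List.pyRange 0 10000 1).find? p with
  | none =>
    -- no candidate offset works, so cands is empty
    have hnone : cands = [] := by
      by_contra hne
      rcases List.exists_mem_of_ne_nil _ hne with ⟨d, hd⟩
      rw [hcands, mem_candidates] at hd
      rcases hd with ⟨hmem, h1, h2⟩
      have hdi : (d - c) ∈ PySem.List.pyRange 0 10000 1 := by
        rw [PySem.List.mem_pyRange_one]; omega
      have := List.find?_eq_none.mp hfind (d - c) hdi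
      rw [hp] at this
      simp at this
      rcases hmem with ⟨l, hl, hdl⟩
      exact this l hl (by simpa using hdl)
    rw [hnone]
    simp [PySem.List.min?]
  | some i0 =>
    have hpi0 : p i0 = true := List.find?_some hfind
    have hi0mem : i0 ∈ PySem.List.pyRange 0 10000 1 := List.mem_of_find?_eq_some hfind
    rw [PySem.List.mem_pyRange_one] at hi0mem
    have hc : (c + i0) ∈ cands := by
      rw [hcands, mem_candidates]
      rw [hp] at hpi0; simp at hpi0
      rcases hpi0 with ⟨l, hl, hmem⟩
      exact ⟨⟨l, hl, hmem⟩, by omega, by omega⟩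
    -- min? is some m
    cases hmin : PySem.List.min? cands (fun x => x) with
    | none =>
      rw [PySem.List.min?_eq_none_iff] at hmin
      rw [hmin] at hc; simp at hc
    | some m =>
      have hmmem : m ∈ cands := PySem.List.min?_mem hmin
      have hmin' := PySem.List.min?_isMin hmin
      have h1 : m ≤ c + i0 := hmin' _ hc
      -- minimality of i0 gives c + i0 ≤ m
      have hm := (mem_candidates ls c m).mp (by rwa [hcands] at hmmem)
      rcases hm with ⟨hmu, hm1, hm2⟩
      have hmi : (m - c) ∈ PySem.List.pyRange 0 10000 1 := by
        rw [PySem.List.mem_pyRange_one]; omega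
      have hpm : p (m - c) = true := by
        rw [hp]; simp only [decide_eq_true_eq]
        rcases hmu with ⟨l, hl, hml⟩
        exact ⟨l, hl, by simpa using hml⟩
      have h2 : i0 ≤ m - c :=
        find?_min_of_pairwise (PySem.List.pairwise_lt_pyRange_one 0 10000) hfind _ hmi hpm
      simp
      omega

-- ===== VERDICT (by name: the statement is the Claim_ definition above) =====
theorem find_first_common_market_day_spec : Claim_equal_find_first_common_market_day := by
  intro ls c _ _
  unfold Spec_find_first_common_market_day
  unfold find_first_common_market_day find_first_common_market_day_alt
  cases hmax : PySem.List.max? (ls.map fun l => l.headD 0) (fun x => x) with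
  | none => rfl
  | some fc =>
    simp only
    by_cases h0 : c = 0
    · simp [h0]
    · by_cases hgt : c > fc
      · have hne : ¬ (c = 0 ∨ c ≤ fc) := by omega
        rw [if_neg h0, if_pos hgt, if_neg hne]
        exact core_eq ls c
      · have hor : c = 0 ∨ c ≤ fc := by omega
        rw [if_neg h0, if_neg hgt, if_pos hor]
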